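-- pv_equiv track=rewrite | github.com/mustafanavedpeerji/DM-Pythonn | main.py | get_category_by_level
-- ===== SOURCE A (Python) =====
-- def get_category_by_level(level: int) -> str:
--     if level == 0:
--         return "Main Industry"
--     elif level == 1:
--         return "sub"
--     elif level == 2:
--         return "sub-sub"
--     elif level == 3:
--         return "sub-sub-sub"
--     else:
--         category = "sub"
--         for i in range(1, level):
--             category += "-sub"
--         return category
-- ===== SOURCE B (Python) =====
-- def get_category_by_level(level: int) -> str:
--     if level == 0:
--         return "Main Industry"
--     return "sub" + "-sub" * (level - 1)
-- ===== Notes on version B (the rewrite author's own statement) =====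
-- stated objective: simpler
-- what changed: Replaced the elif chain for small levels and the accumulation loop with a single closed-form string multiplication 'sub' + '-sub'*(level-1).
import Mathlib
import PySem

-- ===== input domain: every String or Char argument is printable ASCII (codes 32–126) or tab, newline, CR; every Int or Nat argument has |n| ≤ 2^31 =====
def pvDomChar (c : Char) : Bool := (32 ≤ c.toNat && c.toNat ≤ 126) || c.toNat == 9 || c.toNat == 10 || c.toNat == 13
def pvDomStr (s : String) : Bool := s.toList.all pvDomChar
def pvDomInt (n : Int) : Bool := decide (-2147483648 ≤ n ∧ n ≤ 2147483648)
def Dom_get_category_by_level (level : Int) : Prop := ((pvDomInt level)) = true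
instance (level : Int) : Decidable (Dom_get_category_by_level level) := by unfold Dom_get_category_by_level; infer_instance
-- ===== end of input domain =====

-- B replaces A's elif chain and accumulation loop with the closed form "sub" + "-sub"*(level-1) (simpler).

-- ===== PORT A =====
def get_category_by_level (level : Int) : String :=
  if level = 0 then "Main Industry"
  else if level = 1 then "sub"
  else if level = 2 then "sub-sub"
  else if level = 3 then "sub-sub-sub"
  else
    -- category = "sub"; for i in range(1, level): category += "-sub"
    String.ofList ((PySem.List.pyRange 1 level 1).foldl (fun acc _ => acc ++ "-sub".toList) "sub".toList)

-- ===== PORT B =====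
def get_category_by_level_alt (level : Int) : String :=
  if level = 0 then "Main Industry"
  else
    -- "sub" + "-sub" * (level - 1)  (string multiplication; negative count ⇒ empty)
    String.ofList ("sub".toList ++ (List.replicate (level - 1).toNat "-sub".toList).flatten)

-- ===== PRECONDITION & SPEC =====
def Spec_get_category_by_level (level : Int) (out : String) : Prop := out = get_category_by_level_alt level
instance (level : Int) (out : String) : Decidable (Spec_get_category_by_level level out) := by unfold Spec_get_category_by_level; infer_instance

-- ===== CLAIM (what is proved, stated in full; the proofs are below) =====
def Claim_equal_get_category_by_level : Prop := ∀ (level : Int), Dom_get_category_by_level level → Spec_get_category_by_level level (get_category_by_level level)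

-- ===== LEMMAS AND PROOFS =====
theorem foldl_append_const {α : Type} (l : List α) (s acc : List Char) :
    l.foldl (fun a _ => a ++ s) acc = acc ++ (List.replicate l.length s).flatten := by
  induction l generalizing acc with
  | nil => simp
  | cons x xs ih => simp [List.foldl, ih, List.replicate, List.append_assoc]

-- ===== VERDICT (by name: the statement is the Claim_ definition above) =====
theorem get_category_by_level_spec : Claim_equal_get_category_by_level := by
  intro level _
  unfold Spec_get_category_by_level get_category_by_level get_category_by_level_alt
  split_ifs with h0 h1 h2 h3
  · rfl
  · subst h1; decide
  · subst h2; decide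
  · subst h3; decide
  · rw [foldl_append_const, PySem.List.length_pyRange_one]
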